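-- pv_equiv track=rewrite | github.com/dfwlab/cyclicpeptide | cyclicpeptide/Structure2Sequence.py | get_connected_chain
-- ===== SOURCE A (Python) =====
-- def search_one_chain(query_idx, search_idxs, N, connected_pairs):
--     r = 0
--     chain = [query_idx]
--     while r < N:
--         for i, j, t in connected_pairs:
--             if i == query_idx and j in search_idxs and t != 'side chain':
--                 query_idx = j
--                 chain.append(query_idx)
--                 search_idxs = [k for k in search_idxs if k not in chain]
--                 break
--             elif j == query_idx and i in search_idxs and t != 'side chain':
--                 query_idx = i
--                 chain.append(query_idx)
--                 search_idxs = [k for k in search_idxs if k not in chain]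
--                 break
--         r += 1
--     return chain
--
-- def get_connected_chain(connected_pairs, N_aa):
--     search_res = []
--     for query_idx in range(N_aa):
--         search_idxs = [i for i in range(N_aa) if i != query_idx]
--         chain = search_one_chain(query_idx, search_idxs, len(search_idxs), connected_pairs)
--         search_res.append(chain)
--     chain = sorted(search_res, key=lambda x: len(x), reverse=True)[0]
--     if len(chain) == N_aa:
--         return chain
--     cn = 0
--     while cn < 5:  # 最大5条单独链
--         if len(chain) > N_aa - 2:
--             break
--         search_res = []
--         for query_idx in [k for k in range(N_aa) if k not in chain]:
--             search_idxs = [i for i in range(N_aa) if i != query_idx and i not in chain]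
--             temp = search_one_chain(query_idx, search_idxs, len(search_idxs), connected_pairs)
--             search_res.append(temp)
--         chain += sorted(search_res, key=lambda x: len(x), reverse=True)[0]
--         cn += 1
--     if len(chain) < N_aa:
--         chain += [i for i in range(N_aa) if i not in chain]
--     return chain
-- ===== SOURCE B (Python) =====
-- def _walk(adj, start, free):
--     # greedy chain walk with O(1) neighbor candidates and a mutable free-set
--     chain = [start]
--     cur = start
--     while True:
--         nxt = None
--         for x in adj.get(cur, ()):
--             if x in free:
--                 nxt = x
--                 break
--         if nxt is None:
--             return chain
--         free.discard(nxt)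
--         chain.append(nxt)
--         cur = nxt
--
-- def _best(adj, N_aa, excluded):
--     cands = [_walk(adj, s, {i for i in range(N_aa) if i != s and i not in excluded})
--              for s in range(N_aa) if s not in excluded]
--     return max(cands, key=len)
--
-- def get_connected_chain(connected_pairs, N_aa):
--     entries = []
--     for i, j, t in connected_pairs:
--         if t != 'side chain':
--             entries.append((i, j))
--             entries.append((j, i))
--     adj = {}
--     for k, v in entries:
--         adj.setdefault(k, []).append(v)
--     chain = _best(adj, N_aa, set())
--     if len(chain) == N_aa:
--         return chain
--     for _ in range(5):
--         if len(chain) > N_aa - 2: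
--             break
--         chain += _best(adj, N_aa, set(chain))
--     if len(chain) < N_aa:
--         chain += [i for i in range(N_aa) if i not in chain]
--     return chain
-- ===== Notes on version B (the rewrite author's own statement) =====
-- stated objective: faster
-- what changed: B precomputes an ordered adjacency index once and runs each greedy walk with O(1) candidate lookup and a visited free-set that stops when stuck, and picks the longest chain with max(key=len) instead of rescanning all pairs and rebuilding candidate lists on every step and full-sorting the chain list; intended as asymptotically faster (a timing run measured 6.75x/13.6x/16.44x at sizes 64/256/1024 but could not confirm at the largest size, where both time out)
import Mathlib
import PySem

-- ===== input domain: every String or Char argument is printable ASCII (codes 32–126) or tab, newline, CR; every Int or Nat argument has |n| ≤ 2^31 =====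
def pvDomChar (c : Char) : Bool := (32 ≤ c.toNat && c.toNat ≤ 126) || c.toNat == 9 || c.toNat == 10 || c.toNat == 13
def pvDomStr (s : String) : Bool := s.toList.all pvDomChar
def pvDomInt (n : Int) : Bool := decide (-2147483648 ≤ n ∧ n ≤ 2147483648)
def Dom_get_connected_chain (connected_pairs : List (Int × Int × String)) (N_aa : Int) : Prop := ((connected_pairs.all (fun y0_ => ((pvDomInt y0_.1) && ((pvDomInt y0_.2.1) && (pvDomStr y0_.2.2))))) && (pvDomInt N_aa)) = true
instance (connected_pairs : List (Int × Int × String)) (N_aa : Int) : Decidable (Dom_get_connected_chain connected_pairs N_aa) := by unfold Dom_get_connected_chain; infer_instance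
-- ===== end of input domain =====

-- B replaces A's per-step rescan of all pairs by a precomputed ordered adjacency index plus a
-- visited free-set greedy walk, and picks the longest chain with max(key=len) instead of a sort
-- (objective: faster; intended as asymptotically faster — a timing run measured 6.75x/13.6x/16.44x
-- at sizes 64/256/1024 but could not confirm the label at the largest size, where both time out).

-- ===== PORT A =====
-- the inner `for i, j, t in connected_pairs: …` scan of search_one_chain (first matching pair)
def socFind (q : Int) (search : List Int) : List (Int × Int × String) → Option Int
  | [] => none
  | (i, j, t) :: rest =>
    if i == q && search.contains j && t != "side chain" then some j
    else if j == q && search.contains i && t != "side chain" then some i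
    else socFind q search rest

-- the `while r < N` loop of search_one_chain (state: query_idx, chain, search_idxs)
def socLoop (pairs : List (Int × Int × String)) : Nat → Int → List Int → List Int → List Int
  | 0, _, chain, _ => chain
  | r + 1, q, chain, search =>
    match socFind q search pairs with
    | some x => socLoop pairs r x (chain ++ [x]) (search.filter (fun k => !((chain ++ [x]).contains k)))
    | none => socLoop pairs r q chain search

def search_one_chain (query_idx : Int) (search_idxs : List Int) (N : Nat) (pairs : List (Int × Int × String)) : List Int :=
  socLoop pairs N query_idx [query_idx] search_idxs

-- the `while cn < 5` loop of get_connected_chain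
def phase2A (pairs : List (Int × Int × String)) (N_aa : Int) (rng : List Int) : Nat → List Int → List Int
  | 0, chain => chain
  | cn + 1, chain =>
    if N_aa - 2 < (chain.length : Int) then chain
    else
      phase2A pairs N_aa rng cn (chain ++
        (PySem.List.sorted
          ((rng.filter (fun k => !(chain.contains k))).map (fun q =>
            search_one_chain q (rng.filter (fun i => !(i == q) && !(chain.contains i)))
              (rng.filter (fun i => !(i == q) && !(chain.contains i))).length pairs))
          (fun x => x.length) true).headD [])

-- sorted(…)[0]: IndexError on the empty list (N_aa ≤ 0) is excluded by Pre_; headD is exact elsewhere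
def firstChainA (connected_pairs : List (Int × Int × String)) (N_aa : Int) : List Int :=
  (PySem.List.sorted
    ((PySem.List.pyRange 0 N_aa 1).map (fun q =>
      search_one_chain q ((PySem.List.pyRange 0 N_aa 1).filter (fun i => !(i == q)))
        ((PySem.List.pyRange 0 N_aa 1).filter (fun i => !(i == q))).length connected_pairs))
    (fun x => x.length) true).headD []

def finishA (connected_pairs : List (Int × Int × String)) (N_aa : Int) : List Int :=
  if ((firstChainA connected_pairs N_aa).length : Int) == N_aa then firstChainA connected_pairs N_aa
  else
    if ((phase2A connected_pairs N_aa (PySem.List.pyRange 0 N_aa 1) 5 (firstChainA connected_pairs N_aa)).length : Int) < N_aa then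
      phase2A connected_pairs N_aa (PySem.List.pyRange 0 N_aa 1) 5 (firstChainA connected_pairs N_aa)
        ++ (PySem.List.pyRange 0 N_aa 1).filter (fun i => !((phase2A connected_pairs N_aa (PySem.List.pyRange 0 N_aa 1) 5 (firstChainA connected_pairs N_aa)).contains i))
    else phase2A connected_pairs N_aa (PySem.List.pyRange 0 N_aa 1) 5 (firstChainA connected_pairs N_aa)

def get_connected_chain (connected_pairs : List (Int × Int × String)) (N_aa : Int) : List Int :=
  finishA connected_pairs N_aa

-- ===== PORT B =====
-- entries: both directions of every non-side-chain bond, in pair order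
def pvEntries (pairs : List (Int × Int × String)) : List (Int × Int) :=
  pairs.foldl (fun acc p =>
    if p.2.2 != "side chain" then (acc ++ [(p.1, p.2.1)]) ++ [(p.2.1, p.1)] else acc) []

-- adj: ordered adjacency index (dict of lists built with setdefault/append)
def pvAdj (pairs : List (Int × Int × String)) : PySem.Dict Int (List Int) :=
  (pvEntries pairs).foldl (fun d p => d.modify p.1 [] (fun l => l ++ [p.2])) PySem.Dict.empty

-- _walk: greedy chain walk; free is the mutable set of still-available residues
def walkB (adj : PySem.Dict Int (List Int)) (free : List Int) (cur : Int) (chain : List Int) : List Int :=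
  match h : (adj.getD cur []).find? (fun x => free.contains x) with
  | none => chain
  | some x => walkB adj (free.erase x) x (chain ++ [x])
termination_by free.length
decreasing_by
  have hx : free.contains x = true := List.find?_some h
  have hm : x ∈ free := by simpa using hx
  have := List.length_erase_of_mem hm
  have : 0 < free.length := List.length_pos_of_mem hm
  omega

-- _best: longest chain over all admissible starts (max(…, key=len)); ValueError on an
-- empty candidate list (N_aa ≤ 0) is excluded by Pre_; getD is exact elsewhere
def bestB (adj : PySem.Dict Int (List Int)) (N_aa : Int) (excluded : PySem.Set Int) : List Int :=
  (PySem.List.max?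
    (((PySem.List.pyRange 0 N_aa 1).filter (fun s => !(PySem.Set.contains excluded s))).map (fun s =>
      walkB adj
        (PySem.Set.ofList ((PySem.List.pyRange 0 N_aa 1).filter
          (fun i => !(i == s) && !(PySem.Set.contains excluded i)))) s [s]))
    (fun c => c.length)).getD []

-- the `for _ in range(5)` loop of B
def phase2B (adj : PySem.Dict Int (List Int)) (N_aa : Int) : Nat → List Int → List Int
  | 0, chain => chain
  | k + 1, chain =>
    if N_aa - 2 < (chain.length : Int) then chain
    else phase2B adj N_aa k (chain ++ bestB adj N_aa (PySem.Set.ofList chain))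

def finishB (connected_pairs : List (Int × Int × String)) (N_aa : Int) : List Int :=
  if ((bestB (pvAdj connected_pairs) N_aa PySem.Set.empty).length : Int) == N_aa then
    bestB (pvAdj connected_pairs) N_aa PySem.Set.empty
  else
    if ((phase2B (pvAdj connected_pairs) N_aa 5 (bestB (pvAdj connected_pairs) N_aa PySem.Set.empty)).length : Int) < N_aa then
      phase2B (pvAdj connected_pairs) N_aa 5 (bestB (pvAdj connected_pairs) N_aa PySem.Set.empty)
        ++ (PySem.List.pyRange 0 N_aa 1).filter (fun i => !((phase2B (pvAdj connected_pairs) N_aa 5 (bestB (pvAdj connected_pairs) N_aa PySem.Set.empty)).contains i))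
    else phase2B (pvAdj connected_pairs) N_aa 5 (bestB (pvAdj connected_pairs) N_aa PySem.Set.empty)

def get_connected_chain_alt (connected_pairs : List (Int × Int × String)) (N_aa : Int) : List Int :=
  finishB connected_pairs N_aa

-- ===== PRECONDITION & SPEC =====
-- Pre_ excludes only N_aa ≤ 0, where Python A raises IndexError (sorted(search_res, …)[0] of an empty list).
def Pre_get_connected_chain (connected_pairs : List (Int × Int × String)) (N_aa : Int) : Prop := 1 ≤ N_aa
instance (connected_pairs : List (Int × Int × String)) (N_aa : Int) : Decidable (Pre_get_connected_chain connected_pairs N_aa) := by unfold Pre_get_connected_chain; infer_instance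

def pvWitness_get_connected_chain : (List (Int × Int × String)) × Int := ([(0, 1, "backbone"), (1, 2, "side chain")], 3)

def Spec_get_connected_chain (connected_pairs : List (Int × Int × String)) (N_aa : Int) (out : List Int) : Prop := out = get_connected_chain_alt connected_pairs N_aa
instance (connected_pairs : List (Int × Int × String)) (N_aa : Int) (out : List Int) : Decidable (Spec_get_connected_chain connected_pairs N_aa out) := by unfold Spec_get_connected_chain; infer_instance

-- ===== CLAIM (what is proved, stated in full; the proofs are below) =====
def Claim_equal_get_connected_chain : Prop := ∀ (connected_pairs : List (Int × Int × String)) (N_aa : Int), Dom_get_connected_chain connected_pairs N_aa → Pre_get_connected_chain connected_pairs N_aa → Spec_get_connected_chain connected_pairs N_aa (get_connected_chain connected_pairs N_aa)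

-- ===== LEMMAS AND PROOFS =====

theorem socLoop_stuck (pairs : List (Int × Int × String)) (fuel : Nat) (q : Int) (chain search : List Int)
    (h : socFind q search pairs = none) : socLoop pairs fuel q chain search = chain := by
  induction fuel with
  | zero => rfl
  | succ r ih => simp [socLoop, h, ih]

theorem walkB_none (adj : PySem.Dict Int (List Int)) (free : List Int) (cur : Int) (chain : List Int)
    (h : (adj.getD cur []).find? (fun x => free.contains x) = none) :
    walkB adj free cur chain = chain := by
  rw [walkB]; split
  · rfl
  · rename_i y heq
    rw [h] at heq; simp at heq

theorem walkB_some (adj : PySem.Dict Int (List Int)) (free : List Int) (cur : Int) (chain : List Int) (x : Int)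
    (h : (adj.getD cur []).find? (fun x => free.contains x) = some x) :
    walkB adj free cur chain = walkB adj (free.erase x) x (chain ++ [x]) := by
  rw [walkB]; split
  · rename_i heq
    rw [h] at heq; simp at heq
  · rename_i y heq
    rw [h] at heq
    injection heq with hy
    rw [← hy]

-- per-pair contribution to the entries list
def pvEFn (p : Int × Int × String) : List (Int × Int) :=
  if p.2.2 != "side chain" then [(p.1, p.2.1), (p.2.1, p.1)] else []

theorem pvEntries_eq_flatMap (pairs : List (Int × Int × String)) :
    pvEntries pairs = pairs.flatMap pvEFn := by
  have h : pvEntries pairs = pairs.foldl (fun acc p => acc ++ pvEFn p) [] := by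
    unfold pvEntries
    congr 1
    funext acc p
    unfold pvEFn
    split <;> simp
  rw [h, PySem.List.foldl_append_eq_flatMap]
  simp

theorem pvAdj_getD (pairs : List (Int × Int × String)) (q : Int) :
    (pvAdj pairs).getD q [] = ((pairs.flatMap pvEFn).filter (fun p => p.1 == q)).map (fun p => p.2) := by
  unfold pvAdj
  rw [PySem.Dict.getD_foldl_modify_append, pvEntries_eq_flatMap]
  simp

theorem socFind_eq_find? (q : Int) (search : List Int) (pairs : List (Int × Int × String)) :
    socFind q search pairs
      = (((pairs.flatMap pvEFn).filter (fun p => p.1 == q)).map (fun p => p.2)).find? (fun x => search.contains x) := by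
  induction pairs with
  | nil => rfl
  | cons p rest ih =>
    obtain ⟨i, j, t⟩ := p
    rw [List.flatMap_cons, List.filter_append, List.map_append, List.find?_append]
    have hc : socFind q search ((i, j, t) :: rest)
        = if i == q && search.contains j && t != "side chain" then some j
          else if j == q && search.contains i && t != "side chain" then some i
          else socFind q search rest := rfl
    rw [hc, ih]
    generalize (List.find? (fun x => search.contains x)
      (List.map (fun p => p.2) (List.filter (fun p => p.1 == q) (List.flatMap pvEFn rest)))) = F
    cases ht : (t != "side chain") with
    | false =>
      simp only [pvEFn, ht, Bool.false_eq_true, if_false, List.filter_nil, List.map_nil,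
        List.find?_nil, Bool.and_false, Option.none_or]
    | true =>
      simp only [pvEFn, ht, if_true, Bool.and_true]
      cases hi : (i == q) <;> cases hj : (j == q) <;>
        cases hcj : search.contains j <;> cases hci : search.contains i <;>
          simp_all [Option.or]

-- head of a stable reverse sort = Python's max (first maximal element)
theorem head?_insertBy_rev {α κ : Type} [LinearOrder κ] (key : α → κ) (x : α) (acc : List α) :
    (PySem.List.insertBy (fun a b => decide (key b < key a)) x acc).head?
      = some (match acc.head? with
              | none => x
              | some m => if key m < key x then x else m) := by
  cases acc with
  | nil => rfl
  | cons y ys =>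
    by_cases h : key y < key x <;> simp [PySem.List.insertBy, h]

theorem foldl_insertBy_head? {α κ : Type} [LinearOrder κ] (key : α → κ) (l : List α) :
    ∀ acc : List α,
      (l.foldl (fun acc x => PySem.List.insertBy (fun a b => decide (key b < key a)) x acc) acc).head?
        = l.foldl (fun m x =>
            match m with
            | none => some x
            | some m => if key m < key x then some x else some m) acc.head? := by
  induction l with
  | nil => intro acc; rfl
  | cons x xs ih =>
    intro acc
    rw [List.foldl_cons, List.foldl_cons, ih, head?_insertBy_rev]
    cases acc with
    | nil => rfl
    | cons y ys =>
      simp only [List.head?_cons]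
      by_cases h : key y < key x <;> simp [h]

theorem sorted_rev_headD_eq_max? {α κ : Type} [LinearOrder κ] (key : α → κ) (l : List α) (d : α) :
    (PySem.List.sorted l key true).headD d = (PySem.List.max? l key).getD d := by
  have h := foldl_insertBy_head? key l []
  simp only [PySem.List.sorted, PySem.List.max?] at *
  rw [List.headD_eq_head?_getD]
  simpa using congrArg (fun o => o.getD d) h

theorem pyRange_nodup (a b : Int) : (PySem.List.pyRange a b 1).Nodup := by
  unfold PySem.List.pyRange
  simp only [if_neg one_ne_zero]
  apply List.Nodup.map
  · intro k₁ k₂ h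
    simp only [one_mul] at h
    omega
  · exact List.nodup_range

-- the core walk equivalence: A's fuelled rescan loop = B's indexed walk
theorem socLoop_eq_walkB (pairs : List (Int × Int × String)) :
    ∀ (fuel : Nat) (free : List Int) (q : Int) (chain : List Int),
      free.Nodup → (∀ k ∈ free, k ∉ chain) → free.length ≤ fuel →
      socLoop pairs fuel q chain free = walkB (pvAdj pairs) free q chain := by
  intro fuel
  induction fuel with
  | zero =>
    intro free q chain _ _ hlen
    have : free = [] := List.eq_nil_of_length_eq_zero (Nat.le_zero.mp hlen)
    subst this
    rw [walkB_none]
    · rfl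
    · simp
  | succ r ih =>
    intro free q chain hnd hdisj hlen
    have hstep : socFind q free pairs = ((pvAdj pairs).getD q []).find? (fun x => free.contains x) := by
      rw [socFind_eq_find?, pvAdj_getD]
    cases hF : ((pvAdj pairs).getD q []).find? (fun x => free.contains x) with
    | none =>
      rw [walkB_none _ _ _ _ hF]
      exact socLoop_stuck pairs (r + 1) q chain free (hstep.trans hF)
    | some x =>
      have hxmem : x ∈ free := by
        have := List.find?_some hF
        simpa using this
      have hfilter : free.filter (fun k => !((chain ++ [x]).contains k)) = free.erase x := by
        rw [List.Nodup.erase_eq_filter hnd x]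
        apply List.filter_congr
        intro k hk
        have hkc : k ∉ chain := hdisj k hk
        by_cases hkx : k = x <;> simp [hkc, hkx, bne]
      have step : socLoop pairs (r + 1) q chain free
          = socLoop pairs r x (chain ++ [x]) (free.erase x) := by
        simp only [socLoop, hstep, hF, hfilter]
      rw [step, walkB_some _ _ _ _ _ hF]
      apply ih
      · exact hnd.erase x
      · intro k hk
        have hk' := (List.Nodup.mem_erase_iff hnd).mp hk
        simp only [List.mem_append, List.mem_singleton]
        rintro (h | h)
        · exact hdisj k hk'.2 h
        · exact hk'.1 h
      · have := List.length_erase_of_mem hxmem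
        have := List.length_pos_of_mem hxmem
        omega

-- contains on a set built from a nodup-preserving filter of the range
theorem ofList_contains_eq (c : List Int) (k : Int) :
    PySem.Set.contains (PySem.Set.ofList c) k = c.contains k := by
  by_cases h : k ∈ c
  · have : k ∈ PySem.Set.ofList c := (PySem.Set.mem_ofList c k).mpr h
    simp_all
  · have : k ∉ PySem.Set.ofList c := fun hx => h ((PySem.Set.mem_ofList c k).mp hx)
    simp_all

-- A's "pick the longest chain among the admissible starts" = B's bestB
theorem best_eq (pairs : List (Int × Int × String)) (N_aa : Int) (c : List Int) :
    (PySem.List.sorted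
      (((PySem.List.pyRange 0 N_aa 1).filter (fun k => !(c.contains k))).map (fun q =>
        search_one_chain q ((PySem.List.pyRange 0 N_aa 1).filter (fun i => !(i == q) && !(c.contains i)))
          ((PySem.List.pyRange 0 N_aa 1).filter (fun i => !(i == q) && !(c.contains i))).length pairs))
      (fun x => x.length) true).headD []
    = bestB (pvAdj pairs) N_aa (PySem.Set.ofList c) := by
  unfold bestB
  rw [sorted_rev_headD_eq_max?]
  congr 1
  have hstarts : (PySem.List.pyRange 0 N_aa 1).filter (fun s => !(PySem.Set.contains (PySem.Set.ofList c) s))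
      = (PySem.List.pyRange 0 N_aa 1).filter (fun k => !(c.contains k)) := by
    apply List.filter_congr
    intro s _
    rw [ofList_contains_eq]
  rw [hstarts]
  refine congrArg (fun l => PySem.List.max? l (fun c : List Int => c.length)) ?_
  apply List.map_congr_left
  intro s _
  have hfree : PySem.Set.ofList ((PySem.List.pyRange 0 N_aa 1).filter
      (fun i => !(i == s) && !(PySem.Set.contains (PySem.Set.ofList c) i)))
      = (PySem.List.pyRange 0 N_aa 1).filter (fun i => !(i == s) && !(c.contains i)) := by
    have hcongr : (PySem.List.pyRange 0 N_aa 1).filter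
        (fun i => !(i == s) && !(PySem.Set.contains (PySem.Set.ofList c) i))
        = (PySem.List.pyRange 0 N_aa 1).filter (fun i => !(i == s) && !(c.contains i)) := by
      apply List.filter_congr
      intro i _
      rw [ofList_contains_eq]
    rw [hcongr]
    exact PySem.Set.ofList_eq_self_of_nodup _ (List.Nodup.filter _ (pyRange_nodup 0 N_aa))
  rw [hfree]
  unfold search_one_chain
  apply socLoop_eq_walkB
  · exact (pyRange_nodup 0 N_aa).filter _
  · intro k hk
    have := List.of_mem_filter hk
    simp only [Bool.and_eq_true, Bool.not_eq_true'] at this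
    simp only [List.mem_singleton]
    intro hks
    rw [hks] at this
    simp at this
  · exact Nat.le_refl _

theorem phase2_eq (pairs : List (Int × Int × String)) (N_aa : Int) :
    ∀ (k : Nat) (chain : List Int),
      phase2A pairs N_aa (PySem.List.pyRange 0 N_aa 1) k chain = phase2B (pvAdj pairs) N_aa k chain := by
  intro k
  induction k with
  | zero => intro chain; rfl
  | succ n ih =>
    intro chain
    unfold phase2A phase2B
    split
    · rfl
    · rw [best_eq pairs N_aa chain, ih]

theorem firstChain_eq (pairs : List (Int × Int × String)) (N_aa : Int) :
    firstChainA pairs N_aa = bestB (pvAdj pairs) N_aa PySem.Set.empty := by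
  unfold firstChainA
  have h1 : (PySem.List.pyRange 0 N_aa 1).map (fun q =>
        search_one_chain q ((PySem.List.pyRange 0 N_aa 1).filter (fun i => !(i == q)))
          ((PySem.List.pyRange 0 N_aa 1).filter (fun i => !(i == q))).length pairs)
      = ((PySem.List.pyRange 0 N_aa 1).filter (fun k => !(([] : List Int).contains k))).map (fun q =>
        search_one_chain q ((PySem.List.pyRange 0 N_aa 1).filter (fun i => !(i == q) && !(([] : List Int).contains i)))
          ((PySem.List.pyRange 0 N_aa 1).filter (fun i => !(i == q) && !(([] : List Int).contains i))).length pairs) := by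
    simp
  have hempty : (PySem.Set.empty : PySem.Set Int) = PySem.Set.ofList ([] : List Int) := rfl
  rw [h1, best_eq pairs N_aa [], ← hempty]

-- ===== VERDICT (by name: the statement is the Claim_ definition above) =====
theorem get_connected_chain_spec : Claim_equal_get_connected_chain := by
  intro pairs N_aa _ _
  unfold Spec_get_connected_chain get_connected_chain get_connected_chain_alt finishA finishB
  rw [firstChain_eq pairs N_aa, phase2_eq pairs N_aa]
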